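-- pv_equiv track=rewrite | github.com/spel987/Wawacity-Stremio-Addon | wawacity/services/stream.py | _filter_excluded_words
-- ===== SOURCE A (Python) =====
-- from typing import List, Dict, Optional
--
-- def _filter_excluded_words(streams: List[Dict], excluded_words: List[str]) -> List[Dict]:
--     if not excluded_words:
--         return streams
--
--     filtered_streams = []
--
--     for stream in streams:
--         stream_name = stream.get("name", "").lower()
--         stream_desc = stream.get("description", "").lower()
--         stream_text = f"{stream_name} {stream_desc}"
--
--         # --- Check if any excluded word is found ---
--         exclude_stream = False
--         for word in excluded_words:
--             if word.lower() in stream_text: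
--                 exclude_stream = True
--                 break
--
--         if not exclude_stream:
--             filtered_streams.append(stream)
--
--     return filtered_streams
-- ===== SOURCE B (Python) =====
-- def _filter_excluded_words(streams, excluded_words):
--     if not excluded_words:
--         return streams
--
--     # Word-major traversal: build each stream's lowered text once, then make one
--     # filtering pass per excluded word over the shrinking list of survivors.
--     pairs = [(s, (s.get("name", "") + " " + s.get("description", "")).lower())
--              for s in streams]
--     for w in excluded_words:
--         lw = w.lower()
--         pairs = [(s, t) for (s, t) in pairs if lw not in t]
--         if not pairs:
--             break
--     return [s for (s, _) in pairs]
-- ===== Notes on version B (the rewrite author's own statement) =====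
-- stated objective: alternative
-- what changed: B transposes the traversal: it builds each stream's lowered name+description text once, then makes one filtering pass per excluded word over the shrinking list of (stream, text) survivors (stopping early when none remain), instead of A's stream-major loop that re-lowers every word and scans all words per stream with a break flag.
import Mathlib
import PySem

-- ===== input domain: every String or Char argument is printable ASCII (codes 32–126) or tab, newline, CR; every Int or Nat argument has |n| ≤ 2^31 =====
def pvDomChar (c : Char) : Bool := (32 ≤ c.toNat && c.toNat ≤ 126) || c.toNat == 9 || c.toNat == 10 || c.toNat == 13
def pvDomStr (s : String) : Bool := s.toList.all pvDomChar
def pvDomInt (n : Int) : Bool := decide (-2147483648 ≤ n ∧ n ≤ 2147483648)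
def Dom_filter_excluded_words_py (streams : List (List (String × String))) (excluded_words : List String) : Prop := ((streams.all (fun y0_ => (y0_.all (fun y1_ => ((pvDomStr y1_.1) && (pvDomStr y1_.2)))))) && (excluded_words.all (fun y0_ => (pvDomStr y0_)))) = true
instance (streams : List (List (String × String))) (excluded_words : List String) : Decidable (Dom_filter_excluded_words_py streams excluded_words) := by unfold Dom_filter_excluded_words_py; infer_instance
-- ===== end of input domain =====

-- B traverses word-major: each stream's lowered text is built once, then one filtering pass per
-- excluded word over the shrinking survivor list (alternative decomposition; not claimed faster).


-- ===== PORT A =====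
-- inner 'for word in excluded_words: … break' loop of A, with its break flag
def pvAnyWordInA : List String → List Char → Bool
  | [], _ => false
  | w :: ws, text =>
    if PySem.Chars.isIn (PySem.Chars.lower w.toList) text then true
    else pvAnyWordInA ws text

def filter_excluded_words_py (streams : List (List (String × String))) (excluded_words : List String) : List (List (String × String)) :=
  if excluded_words = [] then streams
  else
    streams.foldl (fun acc stream =>
      let stream_name := PySem.Chars.lower ((PySem.Dict.mk stream).getD "name" "").toList
      let stream_desc := PySem.Chars.lower ((PySem.Dict.mk stream).getD "description" "").toList
      let stream_text := stream_name ++ [' '] ++ stream_desc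
      if pvAnyWordInA excluded_words stream_text then acc else acc ++ [stream]) []

-- ===== PORT B =====
-- 'for w in excluded_words: pairs = [...]; if not pairs: break'
def pvWordLoop : List String → List ((List (String × String)) × List Char) → List ((List (String × String)) × List Char)
  | [], pairs => pairs
  | w :: ws, pairs =>
    let lw := PySem.Chars.lower w.toList
    let pairs' := pairs.filter (fun p => ! PySem.Chars.isIn lw p.2)
    if pairs' = [] then pairs' else pvWordLoop ws pairs'

def filter_excluded_words_py_alt (streams : List (List (String × String))) (excluded_words : List String) : List (List (String × String)) :=
  if excluded_words = [] then streams
  else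
    let pairs := streams.map (fun s =>
      (s, PySem.Chars.lower (((PySem.Dict.mk s).getD "name" "").toList ++ [' '] ++ ((PySem.Dict.mk s).getD "description" "").toList)))
    (pvWordLoop excluded_words pairs).map Prod.fst

-- ===== PRECONDITION & SPEC =====
def Spec_filter_excluded_words_py (streams : List (List (String × String))) (excluded_words : List String) (out : List (List (String × String))) : Prop := out = filter_excluded_words_py_alt streams excluded_words
instance (streams : List (List (String × String))) (excluded_words : List String) (out : List (List (String × String))) : Decidable (Spec_filter_excluded_words_py streams excluded_words out) := by unfold Spec_filter_excluded_words_py; infer_instance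

-- ===== CLAIM (what is proved, stated in full; the proofs are below) =====
def Claim_equal_filter_excluded_words_py : Prop := ∀ (streams : List (List (String × String))) (excluded_words : List String), Dom_filter_excluded_words_py streams excluded_words → Spec_filter_excluded_words_py streams excluded_words (filter_excluded_words_py streams excluded_words)

-- ===== LEMMAS AND PROOFS =====

-- A's break loop is an 'any' over the words
lemma pvAnyWordInA_eq_any (ws : List String) (text : List Char) :
    pvAnyWordInA ws text = ws.any (fun w => PySem.Chars.isIn (PySem.Chars.lower w.toList) text) := by
  induction ws with
  | nil => rfl
  | cons w ws ih =>
    cases h : PySem.Chars.isIn (PySem.Chars.lower w.toList) text <;>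
      simp [pvAnyWordInA, ih, h]

-- the sequence of per-word filtering passes is one filter by 'no word occurs'
lemma pvWordLoop_eq_filter (ws : List String) (pairs : List ((List (String × String)) × List Char)) :
    pvWordLoop ws pairs
      = pairs.filter (fun p => ws.all (fun w => ! PySem.Chars.isIn (PySem.Chars.lower w.toList) p.2)) := by
  induction ws generalizing pairs with
  | nil => simp [pvWordLoop]
  | cons w ws ih =>
    simp only [pvWordLoop]
    split_ifs with h
    · rw [h]
      symm
      rw [List.filter_eq_nil_iff]
      rw [List.filter_eq_nil_iff] at h
      intro p hp
      have hin : PySem.Chars.isIn (PySem.Chars.lower w.toList) p.2 = true := by simpa using h p hp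
      simp [hin]
    · rw [ih, List.filter_filter]
      apply List.filter_congr
      intro p _
      simp [Bool.and_comm]

-- mapping fst over a filter on the second component of tagged pairs
lemma map_fst_filter_map {α : Type} (l : List α) (t : α → List Char) (ws : List String) :
    ((l.map (fun s => (s, t s))).filter
        (fun p => ws.all (fun w => ! PySem.Chars.isIn (PySem.Chars.lower w.toList) p.2))).map Prod.fst
      = l.filter (fun s => ws.all (fun w => ! PySem.Chars.isIn (PySem.Chars.lower w.toList) (t s))) := by
  induction l with
  | nil => rfl
  | cons x xs ih =>
    cases h : ws.all (fun w => ! PySem.Chars.isIn (PySem.Chars.lower w.toList) (t x)) <;>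
      simp [h, ih]

-- A's accumulator loop is a filter
lemma foldl_if_append_eq_filter {α : Type} (p : α → Bool) (l : List α) (acc : List α) :
    l.foldl (fun acc x => if p x then acc else acc ++ [x]) acc = acc ++ l.filter (fun x => ! p x) := by
  induction l generalizing acc with
  | nil => simp
  | cons x xs ih => cases h : p x <;> simp [h, ih]

-- A lowers name and description separately; B lowers the concatenation: same text
lemma lower_append_space (name desc : List Char) :
    PySem.Chars.lower (name ++ [' '] ++ desc)
      = PySem.Chars.lower name ++ [' '] ++ PySem.Chars.lower desc := by
  have hsp : PySem.Chars.isupper ' ' = false := by decide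
  simp [PySem.Chars.lower, PySem.Chars.lowerChar, hsp]

-- ===== VERDICT (by name: the statement is the Claim_ definition above) =====
theorem filter_excluded_words_py_spec : Claim_equal_filter_excluded_words_py := by
  intro streams excluded_words _
  unfold Spec_filter_excluded_words_py filter_excluded_words_py filter_excluded_words_py_alt
  by_cases h : excluded_words = []
  · simp [h]
  · simp only [h, if_false]
    rw [foldl_if_append_eq_filter, pvWordLoop_eq_filter]
    rw [map_fst_filter_map]
    simp only [List.nil_append]
    apply List.filter_congr
    intro stream _
    rw [lower_append_space, pvAnyWordInA_eq_any]
    simp [List.all_eq_not_any_not]
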